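-- pv_equiv track=rewrite | github.com/axelmichel/runningmate | processing/system_settings.py | map_activity_types
-- ===== SOURCE A (Python) =====
-- class ViewMode:
--     RUN = "Running"
--     WALK = "Walking"
--     CYCLE = "Cycling"
--     ALL = "All"
--
-- def map_activity_types(activity_type: str):
--     """Maps activity type strings to ViewMode categories."""
--
--     activity_map = {
--         ViewMode.RUN: {"Running", "Trailrun", "Run", "Trackrun", "Track"},
--         ViewMode.WALK: {"Walking", "Hike", "Trekking", "Other", "Nordic Walking"},
--         ViewMode.CYCLE: {
--             "Cycling",
--             "Bike",
--             "MTB",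
--             "Bicycle",
--             "Biking",
--             "E-Bike",
--             "Gravelbike",
--             "Mountainbike",
--         },
--     }
--
--     for mode, valid_names in activity_map.items():
--         if activity_type in valid_names:
--             return mode
--
--     return ViewMode.ALL
-- ===== SOURCE B (Python) =====
-- class ViewMode:
--     RUN = "Running"
--     WALK = "Walking"
--     CYCLE = "Cycling"
--     ALL = "All"
--
-- _ACTIVITY_TO_MODE = {
--     name: mode
--     for mode, names in (
--         (ViewMode.RUN, ("Running", "Trailrun", "Run", "Trackrun", "Track")),
--         (ViewMode.WALK, ("Walking", "Hike", "Trekking", "Other", "Nordic Walking")),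
--         (ViewMode.CYCLE, ("Cycling", "Bike", "MTB", "Bicycle", "Biking",
--                           "E-Bike", "Gravelbike", "Mountainbike")),
--     )
--     for name in names
-- }
--
-- def map_activity_types(activity_type: str):
--     """Maps activity type strings to ViewMode categories."""
--     return _ACTIVITY_TO_MODE.get(activity_type, ViewMode.ALL)
-- ===== Notes on version B (the rewrite author's own statement) =====
-- stated objective: idiomatic
-- what changed: Replaces the loop over three (mode, name-set) pairs with membership tests by one precomputed flat name-to-mode dictionary queried with .get and a default; the loop and branches disappear.
import Mathlib
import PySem

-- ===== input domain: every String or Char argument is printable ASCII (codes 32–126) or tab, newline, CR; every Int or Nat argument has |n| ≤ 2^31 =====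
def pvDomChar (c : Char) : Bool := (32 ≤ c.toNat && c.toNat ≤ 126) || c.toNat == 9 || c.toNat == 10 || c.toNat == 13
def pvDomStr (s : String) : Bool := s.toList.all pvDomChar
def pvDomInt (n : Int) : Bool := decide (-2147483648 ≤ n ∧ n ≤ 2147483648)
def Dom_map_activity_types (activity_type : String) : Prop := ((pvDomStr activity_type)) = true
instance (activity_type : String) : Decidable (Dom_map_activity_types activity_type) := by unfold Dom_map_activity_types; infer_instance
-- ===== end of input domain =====

-- B replaces A's loop over three (mode, name-set) pairs by a single flat name→mode
-- association list queried once with a default (objective: idiomatic).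

-- ===== PORT A =====
-- A's activity_map: insertion-ordered dict of mode → set of valid names
def pvActivityMapA : List (String × PySem.Set String) :=
  [ ("Running", PySem.Set.ofList ["Running", "Trailrun", "Run", "Trackrun", "Track"]),
    ("Walking", PySem.Set.ofList ["Walking", "Hike", "Trekking", "Other", "Nordic Walking"]),
    ("Cycling", PySem.Set.ofList ["Cycling", "Bike", "MTB", "Bicycle", "Biking",
                                  "E-Bike", "Gravelbike", "Mountainbike"]) ]

-- the for-loop with early return over activity_map.items()
def pvLoopA (activity_type : String) : List (String × PySem.Set String) → String
  | [] => "All"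
  | (mode, valid_names) :: rest =>
      if activity_type ∈ valid_names then mode else pvLoopA activity_type rest

def map_activity_types (activity_type : String) : String :=
  pvLoopA activity_type pvActivityMapA

-- ===== PORT B =====
-- B's flat reverse dictionary name → mode, built once
def pvActivityToMode : PySem.Dict String String :=
  PySem.Dict.mk
  [ ("Running", "Running"), ("Trailrun", "Running"), ("Run", "Running"),
    ("Trackrun", "Running"), ("Track", "Running"),
    ("Walking", "Walking"), ("Hike", "Walking"), ("Trekking", "Walking"),
    ("Other", "Walking"), ("Nordic Walking", "Walking"),
    ("Cycling", "Cycling"), ("Bike", "Cycling"), ("MTB", "Cycling"),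
    ("Bicycle", "Cycling"), ("Biking", "Cycling"), ("E-Bike", "Cycling"),
    ("Gravelbike", "Cycling"), ("Mountainbike", "Cycling") ]

def map_activity_types_alt (activity_type : String) : String :=
  PySem.Dict.getD pvActivityToMode activity_type "All"

-- ===== PRECONDITION & SPEC =====
def Spec_map_activity_types (activity_type : String) (out : String) : Prop := out = map_activity_types_alt activity_type
instance (activity_type : String) (out : String) : Decidable (Spec_map_activity_types activity_type out) := by unfold Spec_map_activity_types; infer_instance

-- ===== CLAIM (what is proved, stated in full; the proofs are below) =====
def Claim_equal_map_activity_types : Prop := ∀ (activity_type : String), Dom_map_activity_types activity_type → Spec_map_activity_types activity_type (map_activity_types activity_type)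

-- ===== LEMMAS AND PROOFS =====

-- ===== VERDICT (by name: the statement is the Claim_ definition above) =====
theorem map_activity_types_spec : Claim_equal_map_activity_types := by
  intro s _
  unfold Spec_map_activity_types map_activity_types map_activity_types_alt
  by_cases h1 : s = "Running"; · subst h1; decide
  by_cases h2 : s = "Trailrun"; · subst h2; decide
  by_cases h3 : s = "Run"; · subst h3; decide
  by_cases h4 : s = "Trackrun"; · subst h4; decide
  by_cases h5 : s = "Track"; · subst h5; decide
  by_cases h6 : s = "Walking"; · subst h6; decide
  by_cases h7 : s = "Hike"; · subst h7; decide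
  by_cases h8 : s = "Trekking"; · subst h8; decide
  by_cases h9 : s = "Other"; · subst h9; decide
  by_cases h10 : s = "Nordic Walking"; · subst h10; decide
  by_cases h11 : s = "Cycling"; · subst h11; decide
  by_cases h12 : s = "Bike"; · subst h12; decide
  by_cases h13 : s = "MTB"; · subst h13; decide
  by_cases h14 : s = "Bicycle"; · subst h14; decide
  by_cases h15 : s = "Biking"; · subst h15; decide
  by_cases h16 : s = "E-Bike"; · subst h16; decide
  by_cases h17 : s = "Gravelbike"; · subst h17; decide
  by_cases h18 : s = "Mountainbike"; · subst h18; decide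
  simp [pvLoopA, pvActivityMapA, pvActivityToMode, PySem.Dict.getD_eq_get?_getD,
        PySem.Dict.get?, List.find?, PySem.Set.mem_ofList,
        h1, h2, h3, h4, h5, h6, h7, h8, h9, h10, h11, h12, h13, h14, h15, h16, h17, h18,
        show ("Running" == s) = false from beq_eq_false_iff_ne.mpr (Ne.symm h1),
        show ("Trailrun" == s) = false from beq_eq_false_iff_ne.mpr (Ne.symm h2),
        show ("Run" == s) = false from beq_eq_false_iff_ne.mpr (Ne.symm h3),
        show ("Trackrun" == s) = false from beq_eq_false_iff_ne.mpr (Ne.symm h4),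
        show ("Track" == s) = false from beq_eq_false_iff_ne.mpr (Ne.symm h5),
        show ("Walking" == s) = false from beq_eq_false_iff_ne.mpr (Ne.symm h6),
        show ("Hike" == s) = false from beq_eq_false_iff_ne.mpr (Ne.symm h7),
        show ("Trekking" == s) = false from beq_eq_false_iff_ne.mpr (Ne.symm h8),
        show ("Other" == s) = false from beq_eq_false_iff_ne.mpr (Ne.symm h9),
        show ("Nordic Walking" == s) = false from beq_eq_false_iff_ne.mpr (Ne.symm h10),
        show ("Cycling" == s) = false from beq_eq_false_iff_ne.mpr (Ne.symm h11),
        show ("Bike" == s) = false from beq_eq_false_iff_ne.mpr (Ne.symm h12),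
        show ("MTB" == s) = false from beq_eq_false_iff_ne.mpr (Ne.symm h13),
        show ("Bicycle" == s) = false from beq_eq_false_iff_ne.mpr (Ne.symm h14),
        show ("Biking" == s) = false from beq_eq_false_iff_ne.mpr (Ne.symm h15),
        show ("E-Bike" == s) = false from beq_eq_false_iff_ne.mpr (Ne.symm h16),
        show ("Gravelbike" == s) = false from beq_eq_false_iff_ne.mpr (Ne.symm h17),
        show ("Mountainbike" == s) = false from beq_eq_false_iff_ne.mpr (Ne.symm h18)]
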